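-- pv_equiv track=rewrite | github.com/Upendra-Sahu-ML/observability-agent | agents/infrastructure_agent/agent.py | _determine_infrastructure_issue
-- ===== SOURCE A (Python) =====
-- def _determine_infrastructure_issue(alert, analysis_results):
--     """Determine the primary infrastructure issue based on analysis results"""
--     alert_name = alert.get("labels", {}).get("alertname", "").lower()
--
--     # Combine all analysis results
--     combined_analysis = "\n".join([
--         str(result) for result in analysis_results.values() if result
--     ]).lower()
--
--     # Priority-based issue classification for infrastructure
--     if "deployment" in combined_analysis and ("failed" in combined_analysis or "error" in combined_analysis):
--         return "Deployment failure detected"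
--     elif "configuration" in combined_analysis and ("mismatch" in combined_analysis or "invalid" in combined_analysis):
--         return "Configuration issue identified"
--     elif "rollback" in combined_analysis:
--         return "Rollback required"
--     elif "version" in combined_analysis and ("conflict" in combined_analysis or "mismatch" in combined_analysis):
--         return "Version compatibility issue"
--     elif "resource" in combined_analysis and ("limit" in combined_analysis or "quota" in combined_analysis):
--         return "Resource constraint detected"
--     elif "health" in combined_analysis and ("unhealthy" in combined_analysis or "failing" in combined_analysis):
--         return "Service health issue"
--     elif "sync" in combined_analysis and ("failed" in combined_analysis or "error" in combined_analysis):
--         return "ArgoCD sync failure"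
--     else:
--         # Fall back to alert-based categorization
--         if "deployment" in alert_name:
--             return "Deployment-related alert"
--         elif "config" in alert_name:
--             return "Configuration alert"
--         elif "resource" in alert_name:
--             return "Resource alert"
--         else:
--             return "Infrastructure anomaly detected"
-- ===== SOURCE B (Python) =====
-- # B: one left-to-right scan of the text collects the set of classification keywords that
-- # occur in it (multi-keyword scan); the verdict is then a pure decision over that set.
-- _TEXT_KEYWORDS = ("deployment", "failed", "error", "configuration", "mismatch",
--                   "invalid", "rollback", "version", "conflict", "resource",
--                   "limit", "quota", "health", "unhealthy", "failing", "sync")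
-- _NAME_KEYWORDS = ("deployment", "config", "resource")
--
--
-- def _found_keywords(text, keywords):
--     """Single pass over text: at each position record every keyword starting there."""
--     found = set()
--     for i in range(len(text)):
--         for kw in keywords:
--             if text.startswith(kw, i):
--                 found.add(kw)
--     return found
--
--
-- def _determine_infrastructure_issue(alert, analysis_results):
--     alert_name = alert.get("labels", {}).get("alertname", "").lower()
--     combined = "\n".join(str(r) for r in analysis_results.values() if r).lower()
--     f = _found_keywords(combined, _TEXT_KEYWORDS)
--     if "deployment" in f and ("failed" in f or "error" in f):
--         return "Deployment failure detected"
--     if "configuration" in f and ("mismatch" in f or "invalid" in f):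
--         return "Configuration issue identified"
--     if "rollback" in f:
--         return "Rollback required"
--     if "version" in f and ("conflict" in f or "mismatch" in f):
--         return "Version compatibility issue"
--     if "resource" in f and ("limit" in f or "quota" in f):
--         return "Resource constraint detected"
--     if "health" in f and ("unhealthy" in f or "failing" in f):
--         return "Service health issue"
--     if "sync" in f and ("failed" in f or "error" in f):
--         return "ArgoCD sync failure"
--     g = _found_keywords(alert_name, _NAME_KEYWORDS)
--     if "deployment" in g:
--         return "Deployment-related alert"
--     if "config" in g:
--         return "Configuration alert"
--     if "resource" in g:
--         return "Resource alert"
--     return "Infrastructure anomaly detected"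
-- ===== Notes on version B (the rewrite author's own statement) =====
-- stated objective: alternative
-- what changed: Instead of running a separate substring search per branch, B makes one left-to-right scan over the combined text (and one over the alert name) collecting the set of keywords that start at each position, then decides the verdict by set-membership tests over that found-set.
import Mathlib
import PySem

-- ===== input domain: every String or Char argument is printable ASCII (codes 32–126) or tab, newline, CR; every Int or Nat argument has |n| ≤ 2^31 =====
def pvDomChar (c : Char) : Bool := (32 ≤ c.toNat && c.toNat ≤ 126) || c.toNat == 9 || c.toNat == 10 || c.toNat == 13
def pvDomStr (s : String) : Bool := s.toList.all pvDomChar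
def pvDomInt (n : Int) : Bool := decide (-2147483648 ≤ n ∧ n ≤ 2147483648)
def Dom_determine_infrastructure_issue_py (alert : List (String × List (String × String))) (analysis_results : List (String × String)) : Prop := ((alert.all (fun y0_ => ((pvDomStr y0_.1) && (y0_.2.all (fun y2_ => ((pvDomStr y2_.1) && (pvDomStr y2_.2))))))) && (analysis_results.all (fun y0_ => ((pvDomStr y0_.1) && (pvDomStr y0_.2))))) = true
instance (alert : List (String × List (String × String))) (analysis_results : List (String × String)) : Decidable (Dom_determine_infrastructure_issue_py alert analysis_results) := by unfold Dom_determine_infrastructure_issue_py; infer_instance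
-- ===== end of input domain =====

-- B replaces A's per-branch substring searches by ONE scan over the text that collects the
-- set of keywords occurring in it, then decides by set-membership (alternative decomposition).

-- ===== PORT A =====
def determine_infrastructure_issue_py (alert : List (String × List (String × String))) (analysis_results : List (String × String)) : String :=
  let alert_name := PySem.Str.lower (((PySem.Dict.ofList ((PySem.Dict.ofList alert).getD "labels" [])).getD "alertname" ""))
  let combined_analysis := PySem.Str.lower (PySem.Str.join "\n" (((PySem.Dict.ofList analysis_results).values).filter (fun r => r != "")))
  if PySem.Str.isIn "deployment" combined_analysis && (PySem.Str.isIn "failed" combined_analysis || PySem.Str.isIn "error" combined_analysis) then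
    "Deployment failure detected"
  else if PySem.Str.isIn "configuration" combined_analysis && (PySem.Str.isIn "mismatch" combined_analysis || PySem.Str.isIn "invalid" combined_analysis) then
    "Configuration issue identified"
  else if PySem.Str.isIn "rollback" combined_analysis then
    "Rollback required"
  else if PySem.Str.isIn "version" combined_analysis && (PySem.Str.isIn "conflict" combined_analysis || PySem.Str.isIn "mismatch" combined_analysis) then
    "Version compatibility issue"
  else if PySem.Str.isIn "resource" combined_analysis && (PySem.Str.isIn "limit" combined_analysis || PySem.Str.isIn "quota" combined_analysis) then
    "Resource constraint detected"
  else if PySem.Str.isIn "health" combined_analysis && (PySem.Str.isIn "unhealthy" combined_analysis || PySem.Str.isIn "failing" combined_analysis) then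
    "Service health issue"
  else if PySem.Str.isIn "sync" combined_analysis && (PySem.Str.isIn "failed" combined_analysis || PySem.Str.isIn "error" combined_analysis) then
    "ArgoCD sync failure"
  else if PySem.Str.isIn "deployment" alert_name then
    "Deployment-related alert"
  else if PySem.Str.isIn "config" alert_name then
    "Configuration alert"
  else if PySem.Str.isIn "resource" alert_name then
    "Resource alert"
  else
    "Infrastructure anomaly detected"

-- ===== PORT B =====
def pvTextKeywords : List String :=
  ["deployment", "failed", "error", "configuration", "mismatch", "invalid", "rollback",
   "version", "conflict", "resource", "limit", "quota", "health", "unhealthy", "failing", "sync"]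

def pvNameKeywords : List String := ["deployment", "config", "resource"]

-- Source B's _found_keywords: for i in range(len(text)): for kw in keywords: if text.startswith(kw, i): found.add(kw)
-- (text.startswith(kw, i) with 0 ≤ i ≤ len(text) is exactly 'startswith of text[i:]', ported as Chars.startswith on drop)
def pvFoundKeywords (text : List Char) (kws : List String) : PySem.Set String :=
  (PySem.List.pyRange 0 text.length 1).foldl
    (fun found i =>
      kws.foldl
        (fun found kw =>
          if PySem.Chars.startswith (text.drop i.toNat) kw.toList then PySem.Set.add found kw else found)
        found)
    PySem.Set.empty

def determine_infrastructure_issue_py_alt (alert : List (String × List (String × String))) (analysis_results : List (String × String)) : String :=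
  let alert_name := PySem.Str.lower (((PySem.Dict.ofList ((PySem.Dict.ofList alert).getD "labels" [])).getD "alertname" ""))
  let combined := PySem.Str.lower (PySem.Str.join "\n" (((PySem.Dict.ofList analysis_results).values).filter (fun r => r != "")))
  let f := pvFoundKeywords combined.toList pvTextKeywords
  if PySem.Set.contains f "deployment" && (PySem.Set.contains f "failed" || PySem.Set.contains f "error") then
    "Deployment failure detected"
  else if PySem.Set.contains f "configuration" && (PySem.Set.contains f "mismatch" || PySem.Set.contains f "invalid") then
    "Configuration issue identified"
  else if PySem.Set.contains f "rollback" then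
    "Rollback required"
  else if PySem.Set.contains f "version" && (PySem.Set.contains f "conflict" || PySem.Set.contains f "mismatch") then
    "Version compatibility issue"
  else if PySem.Set.contains f "resource" && (PySem.Set.contains f "limit" || PySem.Set.contains f "quota") then
    "Resource constraint detected"
  else if PySem.Set.contains f "health" && (PySem.Set.contains f "unhealthy" || PySem.Set.contains f "failing") then
    "Service health issue"
  else if PySem.Set.contains f "sync" && (PySem.Set.contains f "failed" || PySem.Set.contains f "error") then
    "ArgoCD sync failure"
  else
    let g := pvFoundKeywords alert_name.toList pvNameKeywords
    if PySem.Set.contains g "deployment" then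
      "Deployment-related alert"
    else if PySem.Set.contains g "config" then
      "Configuration alert"
    else if PySem.Set.contains g "resource" then
      "Resource alert"
    else
      "Infrastructure anomaly detected"

-- ===== PRECONDITION & SPEC =====
def Spec_determine_infrastructure_issue_py (alert : List (String × List (String × String))) (analysis_results : List (String × String)) (out : String) : Prop := out = determine_infrastructure_issue_py_alt alert analysis_results
instance (alert : List (String × List (String × String))) (analysis_results : List (String × String)) (out : String) : Decidable (Spec_determine_infrastructure_issue_py alert analysis_results out) := by unfold Spec_determine_infrastructure_issue_py; infer_instance

-- ===== CLAIM (what is proved, stated in full; the proofs are below) =====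
def Claim_equal_determine_infrastructure_issue_py : Prop := ∀ (alert : List (String × List (String × String))) (analysis_results : List (String × String)), Dom_determine_infrastructure_issue_py alert analysis_results → Spec_determine_infrastructure_issue_py alert analysis_results (determine_infrastructure_issue_py alert analysis_results)

-- ===== LEMMAS AND PROOFS =====

-- membership after Source B's inner keyword loop
lemma pv_mem_foldl_add (c : String → Bool) (kws : List String) (acc : PySem.Set String) (x : String) :
    x ∈ kws.foldl (fun a kw => if c kw then PySem.Set.add a kw else a) acc ↔
      x ∈ acc ∨ (x ∈ kws ∧ c x = true) := by
  induction kws generalizing acc with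
  | nil => simp
  | cons k ks ih =>
    simp only [List.foldl_cons]
    rw [ih]
    by_cases h : c k <;> by_cases hx : x = k <;>
      simp_all [PySem.Set.mem_add]

-- membership after Source B's outer position loop
lemma pv_mem_foldl_scan (text : List Char) (kws : List String) (is : List Int)
    (acc : PySem.Set String) (x : String) :
    x ∈ is.foldl
        (fun found i =>
          kws.foldl
            (fun found kw =>
              if PySem.Chars.startswith (text.drop i.toNat) kw.toList then PySem.Set.add found kw else found)
            found) acc ↔
      x ∈ acc ∨ (x ∈ kws ∧ ∃ i ∈ is, PySem.Chars.startswith (text.drop i.toNat) x.toList = true) := by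
  induction is generalizing acc with
  | nil => simp
  | cons i is ih =>
    simp only [List.foldl_cons]
    rw [ih, pv_mem_foldl_add]
    simp only [List.mem_cons]
    constructor
    · rintro (((h | ⟨hk, hc⟩) | ⟨hk, j, hj, hc⟩))
      · exact Or.inl h
      · exact Or.inr ⟨hk, i, Or.inl rfl, hc⟩
      · exact Or.inr ⟨hk, j, Or.inr hj, hc⟩
    · rintro (h | ⟨hk, j, (rfl | hj), hc⟩)
      · exact Or.inl (Or.inl h)
      · exact Or.inl (Or.inr ⟨hk, hc⟩)
      · exact Or.inr ⟨hk, j, hj, hc⟩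

-- a nonempty keyword found at some position of the scan ↔ it is a substring
lemma pv_contains_found (s : String) (kws : List String) (kw : String)
    (h1 : kw ∈ kws) (h2 : kw.toList ≠ []) :
    PySem.Set.contains (pvFoundKeywords s.toList kws) kw = PySem.Str.isIn kw s := by
  rw [Bool.eq_iff_iff]
  unfold PySem.Set.contains
  rw [List.contains_iff_mem]
  unfold pvFoundKeywords
  rw [pv_mem_foldl_scan]
  rw [PySem.Str.isIn_eq, ← PySem.Chars.exists_prefix_drop_iff_isIn]
  simp only [PySem.Set.empty, List.not_mem_nil, false_or, PySem.List.mem_pyRange_one]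
  constructor
  · rintro ⟨-, i, ⟨hi0, hilt⟩, hc⟩
    exact ⟨i.toNat, (PySem.Chars.startswith_iff _ _).mp hc⟩
  · rintro ⟨j, hj⟩
    refine ⟨h1, ?_⟩
    by_cases hlt : j < s.toList.length
    · exact ⟨(j : Int), ⟨by positivity, by exact_mod_cast hlt⟩,
        (PySem.Chars.startswith_iff _ _).mpr (by simpa using hj)⟩
    · exfalso
      rw [List.drop_eq_nil_of_le (by omega)] at hj
      exact h2 (List.prefix_nil.mp hj)

-- ===== VERDICT (by name: the statement is the Claim_ definition above) =====
theorem determine_infrastructure_issue_py_spec : Claim_equal_determine_infrastructure_issue_py := by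
  intro alert analysis_results _
  unfold Spec_determine_infrastructure_issue_py determine_infrastructure_issue_py determine_infrastructure_issue_py_alt
  generalize PySem.Str.lower (((PySem.Dict.ofList ((PySem.Dict.ofList alert).getD "labels" [])).getD "alertname" "")) = N
  generalize PySem.Str.lower (PySem.Str.join "\n" (((PySem.Dict.ofList analysis_results).values).filter (fun r => r != ""))) = C
  dsimp only
  rw [pv_contains_found C pvTextKeywords "deployment" (by decide) (by decide),
      pv_contains_found C pvTextKeywords "failed" (by decide) (by decide),
      pv_contains_found C pvTextKeywords "error" (by decide) (by decide),
      pv_contains_found C pvTextKeywords "configuration" (by decide) (by decide),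
      pv_contains_found C pvTextKeywords "mismatch" (by decide) (by decide),
      pv_contains_found C pvTextKeywords "invalid" (by decide) (by decide),
      pv_contains_found C pvTextKeywords "rollback" (by decide) (by decide),
      pv_contains_found C pvTextKeywords "version" (by decide) (by decide),
      pv_contains_found C pvTextKeywords "conflict" (by decide) (by decide),
      pv_contains_found C pvTextKeywords "resource" (by decide) (by decide),
      pv_contains_found C pvTextKeywords "limit" (by decide) (by decide),
      pv_contains_found C pvTextKeywords "quota" (by decide) (by decide),
      pv_contains_found C pvTextKeywords "health" (by decide) (by decide),
      pv_contains_found C pvTextKeywords "unhealthy" (by decide) (by decide),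
      pv_contains_found C pvTextKeywords "failing" (by decide) (by decide),
      pv_contains_found C pvTextKeywords "sync" (by decide) (by decide),
      pv_contains_found N pvNameKeywords "deployment" (by decide) (by decide),
      pv_contains_found N pvNameKeywords "config" (by decide) (by decide),
      pv_contains_found N pvNameKeywords "resource" (by decide) (by decide)]
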